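-- pv_equiv track=rewrite | github.com/amol-ship-it/agi-core | domains/arc/transformation_primitives.py | gravity_up
-- ===== SOURCE A (Python) =====
-- Grid = list[list[int]]
--
-- def gravity_up(grid: Grid) -> Grid:
--     """Move all non-zero pixels up by gravity (within each column)."""
--     if not grid or not grid[0]:
--         return grid
--     h, w = len(grid), len(grid[0])
--     result = [[0] * w for _ in range(h)]
--     for c in range(w):
--         non_zero = [grid[r][c] for r in range(h) if grid[r][c] != 0]
--         for i, val in enumerate(non_zero):
--             result[i][c] = val
--     return result
-- ===== SOURCE B (Python) =====
-- Grid = list[list[int]]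
--
-- def gravity_up(grid: Grid) -> Grid:
--     """Move all non-zero pixels up by gravity (within each column)."""
--     if not grid or not grid[0]:
--         return grid
--     h, w = len(grid), len(grid[0])
--     result = [[0] * w for _ in range(h)]
--     fill = [0] * w
--     for r in range(h):
--         for c in range(w):
--             v = grid[r][c]
--             if v != 0:
--                 result[fill[c]][c] = v
--                 fill[c] += 1
--     return result
-- ===== Notes on version B (the rewrite author's own statement) =====
-- stated objective: alternative
-- what changed: Instead of gathering each column's non-zeros into a temporary list and then writing them (column-major, two passes per column), B makes one row-major pass over the grid maintaining a per-column write-pointer array fill and drops each non-zero at result[fill[c]][c].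
import Mathlib
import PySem

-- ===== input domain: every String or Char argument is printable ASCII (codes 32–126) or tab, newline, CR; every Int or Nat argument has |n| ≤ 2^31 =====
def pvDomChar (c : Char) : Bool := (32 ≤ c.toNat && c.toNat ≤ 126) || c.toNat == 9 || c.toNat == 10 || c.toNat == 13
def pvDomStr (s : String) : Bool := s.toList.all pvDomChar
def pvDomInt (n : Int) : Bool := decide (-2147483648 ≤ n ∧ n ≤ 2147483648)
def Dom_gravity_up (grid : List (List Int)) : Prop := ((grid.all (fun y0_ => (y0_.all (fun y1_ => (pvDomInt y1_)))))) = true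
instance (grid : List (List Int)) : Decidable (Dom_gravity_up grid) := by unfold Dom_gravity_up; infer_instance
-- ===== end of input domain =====

-- B replaces A's per-column gather-then-write passes by a single row-major pass that
-- maintains a per-column write-pointer array (alternative decomposition, same asymptotic cost).

-- ===== PORT A =====
-- grid[r][c]; always in range on inputs admitted by Pre_, where the default is never used
def pvCell (grid : List (List Int)) (r c : Nat) : Int := (grid.getD r []).getD c 0

-- A's comprehension: [grid[r][c] for r in range(h) if grid[r][c] != 0]
def pvNzCol (grid : List (List Int)) (c h : Nat) : List Int :=
  (List.range h).filterMap (fun r => if pvCell grid r c ≠ 0 then some (pvCell grid r c) else none)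

def gravity_up (grid : List (List Int)) : List (List Int) :=
  match grid with
  | [] => grid
  | g0 :: _ =>
    if g0 = [] then grid else
      let h := grid.length
      let w := g0.length
      let result := List.replicate h (List.replicate w (0 : Int))
      (List.range w).foldl (fun result c =>
        ((pvNzCol grid c h).zipIdx).foldl
          (fun result iv => result.modify iv.2 (fun row => row.set c iv.1)) result) result

-- ===== PORT B =====
-- body of B's inner loop: if grid[r][c] != 0: result[fill[c]][c] = v; fill[c] += 1
def pvStepB (grid : List (List Int)) (r : Nat) (st : List (List Int) × List Nat) (c : Nat) :
    List (List Int) × List Nat :=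
  let v := pvCell grid r c
  if v ≠ 0 then (st.1.modify (st.2.getD c 0) (fun row => row.set c v), st.2.modify c (· + 1))
  else st

def gravity_up_alt (grid : List (List Int)) : List (List Int) :=
  match grid with
  | [] => grid
  | g0 :: _ =>
    if g0 = [] then grid else
      let h := grid.length
      let w := g0.length
      ((List.range h).foldl (fun st r => (List.range w).foldl (pvStepB grid r) st)
        (List.replicate h (List.replicate w (0 : Int)), List.replicate w 0)).1

-- ===== PRECONDITION & SPEC =====
-- Pre_ excludes exactly the ragged grids (some row shorter than row 0, with the grid and
-- row 0 nonempty) on which the Python A raises IndexError reading grid[r][c]; B raises there too.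
def Pre_gravity_up (grid : List (List Int)) : Prop :=
  grid = [] ∨ grid.headD [] = [] ∨ ∀ row ∈ grid, (grid.headD []).length ≤ row.length

instance (grid : List (List Int)) : Decidable (Pre_gravity_up grid) := by
  unfold Pre_gravity_up; infer_instance

def pvWitness_gravity_up : List (List Int) := [[1, 0], [0, 2]]

def Spec_gravity_up (grid : List (List Int)) (out : List (List Int)) : Prop := out = gravity_up_alt grid
instance (grid : List (List Int)) (out : List (List Int)) : Decidable (Spec_gravity_up grid out) := by unfold Spec_gravity_up; infer_instance

-- ===== CLAIM (what is proved, stated in full; the proofs are below) =====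
def Claim_equal_gravity_up : Prop := ∀ (grid : List (List Int)), Dom_gravity_up grid → Pre_gravity_up grid → Spec_gravity_up grid (gravity_up grid)

-- ===== LEMMAS AND PROOFS =====

def pvE (res : List (List Int)) (i c : Nat) : Int := (res.getD i []).getD c 0

def pvShape (res : List (List Int)) (h w : Nat) : Prop :=
  res.length = h ∧ ∀ i < h, (res.getD i []).length = w

lemma pvE_replicate (h w i c : Nat) :
    pvE (List.replicate h (List.replicate w (0 : Int))) i c = 0 := by
  simp [pvE, List.getD_eq_getElem?_getD, List.getElem?_replicate]
  split <;> simp [List.getD_eq_getElem?_getD, List.getElem?_replicate] <;> split <;> simp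

lemma pvShape_replicate (h w : Nat) :
    pvShape (List.replicate h (List.replicate w (0 : Int))) h w := by
  constructor
  · simp
  · intro i hi
    simp [List.getD_eq_getElem?_getD, List.getElem?_replicate, hi]

lemma getD_eq_of_lt {α : Type} {l : List α} {i : Nat} {d : α} (h : i < l.length) :
    l.getD i d = l[i] := by
  simp [List.getD_eq_getElem?_getD, List.getElem?_eq_getElem h]

lemma getD_of_ge {α : Type} {l : List α} {i : Nat} {d : α} (h : l.length ≤ i) :
    l.getD i d = d := by
  simp [List.getD_eq_getElem?_getD, List.getElem?_eq_none h]

lemma pvNzCol_succ (grid : List (List Int)) (c r : Nat) :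
    pvNzCol grid c (r + 1) =
      pvNzCol grid c r ++ (if pvCell grid r c ≠ 0 then [pvCell grid r c] else []) := by
  by_cases hv : pvCell grid r c ≠ 0 <;>
    simp [pvNzCol, List.range_succ, hv]

lemma pvShape_modify_set {res : List (List Int)} {h w i0 c0 : Nat} {v : Int}
    (hS : pvShape res h w) (hi0 : i0 < h) (hc0 : c0 < w) :
    pvShape (res.modify i0 (fun row => row.set c0 v)) h w := by
  obtain ⟨hl, hrow⟩ := hS
  refine ⟨by simp [hl], ?_⟩
  intro i hi
  have hi' : i < res.length := by omega
  rw [List.getD_eq_getElem?_getD, List.getElem?_modify, List.getElem?_eq_getElem hi']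
  by_cases he : i0 = i <;>
    simpa [he] using hrow i hi ▸ (by rw [List.getD_eq_getElem?_getD, List.getElem?_eq_getElem hi'] at *; simpa using hrow i hi)

lemma pvE_modify_set {res : List (List Int)} {h w i0 c0 : Nat} {v : Int}
    (hS : pvShape res h w) (hi0 : i0 < h) (hc0 : c0 < w) (i c : Nat) :
    pvE (res.modify i0 (fun row => row.set c0 v)) i c =
      if i = i0 ∧ c = c0 then v else pvE res i c := by
  obtain ⟨hl, hrow⟩ := hS
  unfold pvE
  by_cases hi : i < res.length
  · have hrowi : (res.modify i0 (fun row => row.set c0 v)).getD i [] =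
        if i0 = i then res[i].set c0 v else res[i] := by
      rw [List.getD_eq_getElem?_getD, List.getElem?_modify, List.getElem?_eq_getElem hi]
      by_cases he : i0 = i <;> simp [he]
    rw [hrowi, getD_eq_of_lt hi]
    have hwrow : res[i].length = w := by
      have := hrow i (by omega); rwa [getD_eq_of_lt hi] at this
    by_cases he : i0 = i
    · rw [if_pos he]
      rcases eq_or_ne c c0 with hc | hc
      · rw [if_pos ⟨he.symm, hc⟩]
        subst hc
        rw [List.getD_eq_getElem?_getD, List.getElem?_set, if_pos rfl, if_pos (by omega)]
        simp
      · rw [if_neg (by tauto)]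
        rw [List.getD_eq_getElem?_getD, List.getElem?_set, if_neg (by omega),
          ← List.getD_eq_getElem?_getD]
    · rw [if_neg he, if_neg (by tauto)]
  · have hge : res.length ≤ i := by omega
    have e1 : (res.modify i0 (fun row => row.set c0 v)).getD i ([] : List Int) = [] :=
      getD_of_ge (by simpa using hge)
    have e2 : res.getD i ([] : List Int) = [] := getD_of_ge hge
    rw [e1, e2, if_neg (fun hcc => by omega)]

lemma pv_eq_of_shape {r1 r2 : List (List Int)} {h w : Nat}
    (h1 : pvShape r1 h w) (h2 : pvShape r2 h w)
    (hE : ∀ i c, i < h → c < w → pvE r1 i c = pvE r2 i c) : r1 = r2 := by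
  obtain ⟨l1, row1⟩ := h1
  obtain ⟨l2, row2⟩ := h2
  apply List.ext_getElem (by omega)
  intro i hi1 hi2
  have hih : i < h := by omega
  have ha := row1 i hih; rw [getD_eq_of_lt hi1] at ha
  have hb := row2 i hih; rw [getD_eq_of_lt hi2] at hb
  apply List.ext_getElem (by omega)
  intro c hc1 hc2
  have hcw : c < w := by omega
  have hEe := hE i c hih hcw
  unfold pvE at hEe
  rw [getD_eq_of_lt hi1, getD_eq_of_lt hi2, getD_eq_of_lt (by omega),
    getD_eq_of_lt (by omega)] at hEe
  exact hEe

lemma getD_append_last {L : List Int} {v : Int} (i : Nat) :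
    (L ++ [v]).getD i 0 = if i = L.length then v else L.getD i 0 := by
  rcases Nat.lt_trichotomy i L.length with hlt | heq | hgt
  · rw [if_neg (by omega), List.getD_eq_getElem?_getD, List.getElem?_append_left hlt, ← List.getD_eq_getElem?_getD]
  · subst heq; simp
  · rw [if_neg (by omega), getD_of_ge (by simp; omega), getD_of_ge (by omega)]

lemma A_inner {h w c : Nat} (hc : c < w) (nzl : List Int) :
    ∀ (n : Nat) (res : List (List Int)), pvShape res h w → n + nzl.length ≤ h →
    pvShape ((nzl.zipIdx n).foldl
        (fun result iv => result.modify iv.2 (fun row => row.set c iv.1)) res) h w ∧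
    ∀ i c', i < h → c' < w →
      pvE ((nzl.zipIdx n).foldl
        (fun result iv => result.modify iv.2 (fun row => row.set c iv.1)) res) i c' =
      if c' = c ∧ n ≤ i ∧ i < n + nzl.length then nzl.getD (i - n) 0 else pvE res i c' := by
  induction nzl with
  | nil =>
    intro n res hS _
    refine ⟨by simpa using hS, ?_⟩
    intro i c' hi hc'
    simp only [List.zipIdx, List.foldl_nil]
    rw [if_neg (by rintro ⟨-, h2, h3⟩; simp at h3; omega)]
  | cons x xs ih =>
    intro n res hS hn
    have hnh : n < h := by simp at hn; omega
    have hS1 := pvShape_modify_set (i0 := n) (c0 := c) (v := x) hS hnh hc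
    have hstep : (((x :: xs).zipIdx n).foldl
        (fun result iv => result.modify iv.2 (fun row => row.set c iv.1)) res) =
        ((xs.zipIdx (n+1)).foldl
        (fun result iv => result.modify iv.2 (fun row => row.set c iv.1))
          (res.modify n (fun row => row.set c x))) := by
      simp [List.zipIdx_cons]
    rw [hstep]
    obtain ⟨hS', hE'⟩ := ih (n+1) _ hS1 (by simp at hn ⊢; omega)
    refine ⟨hS', ?_⟩
    intro i c' hi hc'
    rw [hE' i c' hi hc', pvE_modify_set hS hnh hc]
    by_cases h1 : c' = c ∧ n + 1 ≤ i ∧ i < n + 1 + xs.length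
    · rw [if_pos h1, if_pos ⟨h1.1, by omega, by simp only [List.length_cons]; omega⟩]
      obtain ⟨rfl, h2, h3⟩ := h1
      have : i - n = (i - (n+1)) + 1 := by omega
      rw [this, List.getD_cons_succ]
    · rw [if_neg h1]
      by_cases h2 : i = n ∧ c' = c
      · rw [if_pos h2, if_pos ⟨h2.2, by omega, by simp only [List.length_cons]; omega⟩]
        obtain ⟨rfl, rfl⟩ := h2
        simp
      · rw [if_neg h2, if_neg (by
          rintro ⟨hcc, h4, h5⟩
          simp only [List.length_cons] at h5
          rcases Nat.lt_or_ge i (n + 1) with hlt | hge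
          · exact h2 ⟨by omega, hcc⟩
          · exact h1 ⟨hcc, by omega, by omega⟩)]

lemma pvNzCol_len (grid : List (List Int)) (c r : Nat) :
    (pvNzCol grid c r).length ≤ r := by
  calc (pvNzCol grid c r).length ≤ (List.range r).length := List.length_filterMap_le _ _
    _ = r := List.length_range

lemma A_outer {grid : List (List Int)} {h w : Nat} :
    ∀ (cs : List Nat), (∀ c ∈ cs, c < w) → cs.Nodup →
    ∀ (res : List (List Int)), pvShape res h w →
    (∀ i c', i < h → c' ∈ cs → pvE res i c' = 0) →
    pvShape (cs.foldl (fun result c =>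
        ((pvNzCol grid c h).zipIdx).foldl
          (fun result iv => result.modify iv.2 (fun row => row.set c iv.1)) result) res) h w ∧
    ∀ i c', i < h → c' < w →
      pvE (cs.foldl (fun result c =>
        ((pvNzCol grid c h).zipIdx).foldl
          (fun result iv => result.modify iv.2 (fun row => row.set c iv.1)) result) res) i c' =
      if c' ∈ cs then (pvNzCol grid c' h).getD i 0 else pvE res i c' := by
  intro cs
  induction cs with
  | nil => intro _ _ res hS _; exact ⟨hS, fun i c' hi hc' => by simp⟩
  | cons c rest ih =>
    intro hlt hnd res hS h0
    have hc : c < w := hlt c (by simp)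
    have hlen : (pvNzCol grid c h).length ≤ h := pvNzCol_len grid c h
    obtain ⟨hS1, hE1⟩ := A_inner hc (pvNzCol grid c h) 0 res hS (by omega)
    simp only [List.foldl_cons]
    have h0' : ∀ i c', i < h → c' ∈ rest → pvE (((pvNzCol grid c h).zipIdx).foldl
        (fun result iv => result.modify iv.2 (fun row => row.set c iv.1)) res) i c' = 0 := by
      intro i c' hi hm
      rw [hE1 i c' hi (hlt c' (by simp [hm]))]
      have hne : c' ≠ c := by
        simp at hnd; intro he; exact hnd.1 (he ▸ hm)
      rw [if_neg (fun hx => hne hx.1), h0 i c' hi (by simp [hm])]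
    obtain ⟨hS', hE'⟩ := ih (fun c' hm => hlt c' (by simp [hm])) (by simp at hnd; exact hnd.2)
      _ hS1 h0'
    refine ⟨hS', ?_⟩
    intro i c' hi hc'
    rw [hE' i c' hi hc']
    by_cases hm : c' ∈ rest
    · rw [if_pos hm, if_pos (by simp [hm])]
    · rw [if_neg hm, hE1 i c' hi hc']
      by_cases hec : c' = c
      · rw [hec]
        rw [if_pos (List.mem_cons_self)]
        by_cases hin : i < (pvNzCol grid c h).length
        · rw [if_pos ⟨rfl, by omega, by omega⟩]; simp
        · rw [if_neg (by rintro ⟨-, -, h3⟩; omega),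
            h0 i c hi (List.mem_cons_self), getD_of_ge (by omega)]
      · rw [if_neg (fun hx => hec hx.1), if_neg (by simp [hec, hm])]

lemma getD_modify_add {l : List Nat} {c c' : Nat} (hc : c < l.length) :
    (l.modify c (· + 1)).getD c' 0 = if c' = c then l.getD c' 0 + 1 else l.getD c' 0 := by
  by_cases h' : c' < l.length
  · rw [List.getD_eq_getElem?_getD, List.getElem?_modify, List.getElem?_eq_getElem h']
    by_cases he : c' = c
    · subst he
      simp [List.getElem?_eq_getElem h', getD_eq_of_lt h']
    · have hne : ¬ c = c' := fun x => he x.symm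
      simp [he, hne, List.getElem?_eq_getElem h', getD_eq_of_lt h']
  · have hge : l.length ≤ c' := by omega
    rw [getD_of_ge (by simpa using hge), getD_of_ge hge, if_neg (by omega)]

lemma B_inner {grid : List (List Int)} {h w r : Nat} (hr : r < h) :
    ∀ (cs : List Nat), (∀ c ∈ cs, c < w) → cs.Nodup →
    ∀ (st : List (List Int) × List Nat), pvShape st.1 h w → st.2.length = w →
    (∀ c' ∈ cs, st.2.getD c' 0 = (pvNzCol grid c' r).length ∧
      ∀ i, i < h → pvE st.1 i c' = (pvNzCol grid c' r).getD i 0) →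
    pvShape (cs.foldl (pvStepB grid r) st).1 h w ∧ (cs.foldl (pvStepB grid r) st).2.length = w ∧
    ∀ c', c' < w →
      (c' ∈ cs → (cs.foldl (pvStepB grid r) st).2.getD c' 0 = (pvNzCol grid c' (r + 1)).length ∧
        ∀ i, i < h → pvE (cs.foldl (pvStepB grid r) st).1 i c' = (pvNzCol grid c' (r + 1)).getD i 0) ∧
      (c' ∉ cs → (cs.foldl (pvStepB grid r) st).2.getD c' 0 = st.2.getD c' 0 ∧
        ∀ i, i < h → pvE (cs.foldl (pvStepB grid r) st).1 i c' = pvE st.1 i c') := by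
  intro cs
  induction cs with
  | nil =>
    intro _ _ st hS hL _
    exact ⟨hS, hL, fun c' _ => ⟨fun hm => absurd hm (by simp), fun _ => ⟨rfl, fun _ _ => rfl⟩⟩⟩
  | cons c rest ih =>
    intro hlt hnd st hS hL hyp
    have hc : c < w := hlt c (by simp)
    have hcr : c ∈ c :: rest := List.mem_cons_self
    obtain ⟨hfill, hEcol⟩ := hyp c hcr
    have hklen : (pvNzCol grid c r).length ≤ r := pvNzCol_len grid c r
    have hnd' : rest.Nodup := by simp at hnd; exact hnd.2
    have hcnr : c ∉ rest := by simp at hnd; exact hnd.1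
    simp only [List.foldl_cons]
    by_cases hv : pvCell grid r c ≠ 0
    · -- the pixel is written
      have hstep : pvStepB grid r st c =
          (st.1.modify (st.2.getD c 0) (fun row => row.set c (pvCell grid r c)),
           st.2.modify c (· + 1)) := by
        simp only [pvStepB, if_pos hv]
      rw [hstep]
      have hkh : st.2.getD c 0 < h := by rw [hfill]; omega
      have hS1 : pvShape (st.1.modify (st.2.getD c 0)
          (fun row => row.set c (pvCell grid r c))) h w := pvShape_modify_set hS hkh hc
      have hL1 : (st.2.modify c (· + 1)).length = w := by simp [hL]
      have hnz1 : pvNzCol grid c (r + 1) = pvNzCol grid c r ++ [pvCell grid r c] := by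
        rw [pvNzCol_succ, if_pos hv]
      have hyp1 : ∀ c' ∈ rest,
          (st.2.modify c (· + 1)).getD c' 0 = (pvNzCol grid c' r).length ∧
          ∀ i, i < h → pvE (st.1.modify (st.2.getD c 0)
            (fun row => row.set c (pvCell grid r c))) i c' = (pvNzCol grid c' r).getD i 0 := by
        intro c' hm
        have hne : c' ≠ c := fun hx => hcnr (hx ▸ hm)
        obtain ⟨hf0, hE0⟩ := hyp c' (by simp [hm])
        refine ⟨?_, ?_⟩
        · rw [getD_modify_add (by omega), if_neg hne, hf0]
        · intro i hi
          rw [pvE_modify_set hS hkh hc, if_neg (fun hx => hne hx.2), hE0 i hi]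
      obtain ⟨hS', hL', hE'⟩ := ih (fun c' hm => hlt c' (by simp [hm])) hnd'
        (st.1.modify (st.2.getD c 0) (fun row => row.set c (pvCell grid r c)),
         st.2.modify c (· + 1)) hS1 hL1 hyp1
      refine ⟨hS', hL', ?_⟩
      intro c' hc'
      refine ⟨?_, ?_⟩
      · intro hm
        rcases List.mem_cons.mp hm with rfl | hm'
        · obtain ⟨hf2, hE2⟩ := (hE' c' hc').2 hcnr
          refine ⟨?_, ?_⟩
          · rw [hf2, getD_modify_add (by omega), if_pos rfl, hfill, hnz1]
            simp
          · intro i hi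
            rw [hE2 i hi, pvE_modify_set hS hkh hc, hnz1, getD_append_last, hfill]
            by_cases hik : i = (pvNzCol grid c' r).length
            · rw [if_pos ⟨hik, rfl⟩, if_pos hik]
            · rw [if_neg (fun hx => hik hx.1), if_neg hik, hEcol i hi]
        · exact (hE' c' hc').1 hm'
      · intro hm
        have hm' : c' ∉ rest := fun hx => hm (by simp [hx])
        have hne : c' ≠ c := fun hx => hm (by simp [hx])
        obtain ⟨hf2, hE2⟩ := (hE' c' hc').2 hm'
        refine ⟨?_, ?_⟩
        · rw [hf2, getD_modify_add (by omega), if_neg hne]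
        · intro i hi
          rw [hE2 i hi, pvE_modify_set hS hkh hc, if_neg (fun hx => hne hx.2)]
    · -- zero pixel: state unchanged, and the column's non-zero list does not grow
      have hstep : pvStepB grid r st c = st := by
        simp only [pvStepB, if_neg hv]
      rw [hstep]
      have hnz1 : pvNzCol grid c (r + 1) = pvNzCol grid c r := by
        rw [pvNzCol_succ, if_neg hv, List.append_nil]
      obtain ⟨hS', hL', hE'⟩ := ih (fun c' hm => hlt c' (by simp [hm])) hnd' st hS hL
        (fun c' hm => hyp c' (by simp [hm]))
      refine ⟨hS', hL', ?_⟩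
      intro c' hc'
      refine ⟨?_, ?_⟩
      · intro hm
        rcases List.mem_cons.mp hm with rfl | hm'
        · obtain ⟨hf2, hE2⟩ := (hE' c' hc').2 hcnr
          exact ⟨by rw [hf2, hfill, hnz1], fun i hi => by rw [hE2 i hi, hnz1, hEcol i hi]⟩
        · exact (hE' c' hc').1 hm'
      · intro hm
        exact (hE' c' hc').2 (fun hx => hm (by simp [hx]))

def pvBState (grid : List (List Int)) (h w r : Nat) : List (List Int) × List Nat :=
  (List.range r).foldl (fun st r => (List.range w).foldl (pvStepB grid r) st)
    (List.replicate h (List.replicate w (0 : Int)), List.replicate w 0)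

lemma B_outer {grid : List (List Int)} {h w : Nat} :
    ∀ r, r ≤ h →
    pvShape (pvBState grid h w r).1 h w ∧ (pvBState grid h w r).2.length = w ∧
    ∀ c', c' < w → (pvBState grid h w r).2.getD c' 0 = (pvNzCol grid c' r).length ∧
      ∀ i, i < h → pvE (pvBState grid h w r).1 i c' = (pvNzCol grid c' r).getD i 0 := by
  intro r
  induction r with
  | zero =>
    intro _
    refine ⟨by simpa [pvBState] using pvShape_replicate h w, by simp [pvBState], ?_⟩
    intro c' hc'
    constructor
    · show (List.replicate w 0).getD c' 0 = _
      rw [getD_eq_of_lt (by simpa using hc')]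
      simp [pvNzCol]
    · intro i hi
      show pvE (List.replicate h (List.replicate w (0 : Int))) i c' = _
      rw [pvE_replicate]
      simp [pvNzCol]
  | succ r ih =>
    intro hr1
    have hr : r < h := by omega
    obtain ⟨hS, hL, hyp⟩ := ih (by omega)
    have hstep : pvBState grid h w (r + 1) =
        (List.range w).foldl (pvStepB grid r) (pvBState grid h w r) := by
      unfold pvBState
      rw [List.range_succ, List.foldl_append]
      simp
    rw [hstep]
    obtain ⟨hS', hL', hE'⟩ := B_inner hr (List.range w) (fun c hm => List.mem_range.mp hm)
      List.nodup_range _ hS hL (fun c' hm => hyp c' (List.mem_range.mp hm))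
    refine ⟨hS', hL', ?_⟩
    intro c' hc'
    exact (hE' c' hc').1 (List.mem_range.mpr hc')

lemma gravity_up_agrees (grid : List (List Int)) : gravity_up grid = gravity_up_alt grid := by
  match grid with
  | [] => rfl
  | g0 :: rest =>
    by_cases hg : g0 = []
    · simp [gravity_up, gravity_up_alt, hg]
    · have hA : gravity_up (g0 :: rest) =
          (List.range g0.length).foldl (fun result c =>
            ((pvNzCol (g0 :: rest) c (g0 :: rest).length).zipIdx).foldl
              (fun result iv => result.modify iv.2 (fun row => row.set c iv.1)) result)
            (List.replicate (g0 :: rest).length (List.replicate g0.length (0 : Int))) := by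
        simp [gravity_up, hg]
      have hB : gravity_up_alt (g0 :: rest) =
          (pvBState (g0 :: rest) (g0 :: rest).length g0.length (g0 :: rest).length).1 := by
        simp [gravity_up_alt, hg, pvBState]
      obtain ⟨hSA, hEA⟩ := A_outer (grid := g0 :: rest) (h := (g0 :: rest).length)
        (w := g0.length) (List.range g0.length) (fun c hm => List.mem_range.mp hm)
        List.nodup_range _ (pvShape_replicate _ _) (fun i c' _ _ => pvE_replicate _ _ _ _)
      obtain ⟨hSB, hLB, hEB⟩ := B_outer (grid := g0 :: rest) (h := (g0 :: rest).length)
        (w := g0.length) (g0 :: rest).length le_rfl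
      rw [hA, hB]
      apply pv_eq_of_shape hSA hSB
      intro i c hi hc
      rw [hEA i c hi hc, if_pos (List.mem_range.mpr hc)]
      exact ((hEB c hc).2 i hi).symm

-- ===== VERDICT (by name: the statement is the Claim_ definition above) =====
theorem gravity_up_spec : Claim_equal_gravity_up := by
  intro grid _ _
  unfold Spec_gravity_up
  exact gravity_up_agrees grid
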